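-- pv_equiv track=rewrite | github.com/strikersps/Competitive-Programming | Code-Chef/COVID-Pandemic-and-Long-Queue/social_distancing.py | check_rules_followed
-- ===== SOURCE A (Python) =====
-- def check_rules_followed(people_line):
--     is_rules_followed = True
--     last_person_index = -1
--     for position, person in enumerate(people_line):
--         if last_person_index == -1 and person == 1:
--             last_person_index = position
--             continue
--         if last_person_index > -1 and person == 1:
--             if position - last_person_index >= 6:
--                 last_person_index = position
--             else:
--                 is_rules_followed = False
--                 break
--     return is_rules_followed
-- ===== SOURCE B (Python) =====
-- def check_rules_followed(people_line):
--     i, n = 0, len(people_line)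
--     while i < n:
--         if people_line[i] != 1:
--             i += 1
--         elif 1 in people_line[i + 1:i + 6]:
--             return False
--         else:
--             i += 6
--     return True
-- ===== Notes on version B (the rewrite author's own statement) =====
-- stated objective: alternative
-- what changed: Instead of tracking the last occupied index and checking gap arithmetic between consecutive occupied seats, B moves a cursor that, on reaching an occupied seat, scans the next 5 cells as an exclusion window and jumps 6 positions ahead.
import Mathlib
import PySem

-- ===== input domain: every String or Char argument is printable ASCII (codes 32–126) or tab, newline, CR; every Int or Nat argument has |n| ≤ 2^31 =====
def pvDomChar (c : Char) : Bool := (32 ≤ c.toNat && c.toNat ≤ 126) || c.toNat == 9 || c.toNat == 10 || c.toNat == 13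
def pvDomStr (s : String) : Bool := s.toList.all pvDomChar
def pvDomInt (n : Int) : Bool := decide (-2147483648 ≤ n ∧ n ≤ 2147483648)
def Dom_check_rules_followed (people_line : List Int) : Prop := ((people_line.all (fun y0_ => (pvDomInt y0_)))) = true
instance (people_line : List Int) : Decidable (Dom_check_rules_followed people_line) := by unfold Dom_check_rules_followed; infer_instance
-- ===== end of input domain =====

-- B replaces A's last-occupied-index gap arithmetic by a cursor that, at each occupied seat,
-- scans the next 5 cells as an exclusion window and jumps 6 ahead (alternative, same cost).
-- ===== PORT A =====
-- the for-loop with `continue`/`break`, as a structural recursion over the remaining line,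
-- carrying `position` and `last_person_index`; `break` sets is_rules_followed = False and stops.
def checkRulesLoop (xs : List Int) (position last_person_index : Int) : Bool :=
  match xs with
  | [] => true
  | person :: rest =>
    if last_person_index == -1 && person == 1 then
      checkRulesLoop rest (position + 1) position
    else if last_person_index > -1 && person == 1 then
      if position - last_person_index ≥ 6 then checkRulesLoop rest (position + 1) position
      else false
    else checkRulesLoop rest (position + 1) last_person_index

def check_rules_followed (people_line : List Int) : Bool :=
  checkRulesLoop people_line 0 (-1)

-- ===== PORT B =====
-- the while-loop over the cursor i, terminating because n - i shrinks; people_line[i] is ported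
-- with pyGetD, exact here because the loop guard keeps 0 ≤ i < n.
def altLoop (xs : List Int) (n i : Int) : Bool :=
  if h : i < n then
    if PySem.List.pyGetD xs i 0 ≠ 1 then altLoop xs n (i + 1)
    else if (PySem.List.slice xs (some (i + 1)) (some (i + 6))).contains 1 then false
    else altLoop xs n (i + 6)
  else true
termination_by (n - i).toNat
decreasing_by all_goals omega

def check_rules_followed_alt (people_line : List Int) : Bool :=
  altLoop people_line people_line.length 0

-- ===== PRECONDITION & SPEC =====
def Spec_check_rules_followed (people_line : List Int) (out : Bool) : Prop := out = check_rules_followed_alt people_line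
instance (people_line : List Int) (out : Bool) : Decidable (Spec_check_rules_followed people_line out) := by unfold Spec_check_rules_followed; infer_instance

-- ===== CLAIM =====
def Claim_equal_check_rules_followed : Prop := ∀ (people_line : List Int), Dom_check_rules_followed people_line → Spec_check_rules_followed people_line (check_rules_followed people_line)

-- ===== LEMMAS AND PROOFS =====
-- occupied positions of xs when the first element has position `pos`
def occIdx (xs : List Int) (pos : Int) : List Int :=
  match xs with
  | [] => []
  | p :: rest => if p == 1 then pos :: occIdx rest (pos + 1) else occIdx rest (pos + 1)

-- consecutive-gap check, the common characterisation of both programs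
def gapsOK (l : List Int) : Bool := (List.zipWith (fun a b => decide (b - a ≥ 6)) l l.tail).all id

theorem gapsOK_cons2 (a b : Int) (r : List Int) :
    gapsOK (a :: b :: r) = (decide (b - a ≥ 6) && gapsOK (b :: r)) := by
  simp [gapsOK]

theorem loop_eq_gaps (xs : List Int) (pos : Int) (hpos : 0 ≤ pos) :
    checkRulesLoop xs pos (-1) = gapsOK (occIdx xs pos) ∧
    ∀ last : Int, last > -1 → checkRulesLoop xs pos last = gapsOK (last :: occIdx xs pos) := by
  induction xs generalizing pos with
  | nil => simp [checkRulesLoop, occIdx, gapsOK]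
  | cons p rest ih =>
    rcases ih (pos + 1) (by omega) with ⟨ih1, ih2⟩
    constructor
    · by_cases hp : p == 1
      · simp only [checkRulesLoop, occIdx, hp, beq_self_eq_true, Bool.true_and, if_true]
        exact ih2 pos (by omega)
      · simp only [Bool.not_eq_true] at hp
        simp only [checkRulesLoop, occIdx, hp, Bool.and_false, Bool.false_eq_true, if_false]
        exact ih1
    · intro last hlast
      have hne : (last == (-1 : Int)) = false := by
        simp only [beq_eq_false_iff_ne, ne_eq]; omega
      have hdg : decide (last > (-1 : Int)) = true := decide_eq_true hlast
      by_cases hp : p == 1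
      · simp only [checkRulesLoop, occIdx, hp, hne, hdg,
          Bool.and_true, Bool.false_eq_true, if_false, if_true]
        rw [gapsOK_cons2]
        by_cases hgap : pos - last ≥ 6
        · rw [if_pos hgap, decide_eq_true hgap, Bool.true_and]
          exact ih2 pos (by omega)
        · rw [if_neg hgap, decide_eq_false hgap, Bool.false_and]
      · simp only [Bool.not_eq_true] at hp
        simp only [checkRulesLoop, occIdx, hp, Bool.and_false, Bool.false_eq_true, if_false]
        exact ih2 last hlast

theorem occIdx_append (xs ys : List Int) (pos : Int) :
    occIdx (xs ++ ys) pos = occIdx xs pos ++ occIdx ys (pos + xs.length) := by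
  induction xs generalizing pos with
  | nil => simp [occIdx]
  | cons p rest ih =>
    simp only [List.cons_append, occIdx, List.length_cons]
    have e : pos + 1 + (rest.length : Int) = pos + ((rest.length : Int) + 1) := by ring
    by_cases hp : p == 1
    · simp [hp, ih, e]
    · simp [hp, ih, e]

theorem mem_occIdx (xs : List Int) (pos q : Int) (hq : q ∈ occIdx xs pos) :
    pos ≤ q ∧ q < pos + xs.length := by
  induction xs generalizing pos with
  | nil => simp [occIdx] at hq
  | cons p rest ih =>
    simp only [occIdx] at hq
    by_cases hp : p == 1
    · rw [if_pos hp] at hq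
      rcases List.mem_cons.mp hq with h | h
      · subst h; simp
      · have := ih (pos + 1) h; simp at this ⊢; omega
    · rw [if_neg hp] at hq
      have := ih (pos + 1) hq; simp at this ⊢; omega

theorem occIdx_eq_nil (xs : List Int) (pos : Int) (h : (1:Int) ∉ xs) :
    occIdx xs pos = [] := by
  induction xs generalizing pos with
  | nil => rfl
  | cons p rest ih =>
    simp only [List.mem_cons, not_or] at h
    have hp : (p == (1:Int)) = false := by
      simp only [beq_eq_false_iff_ne, ne_eq]
      exact fun e => h.1 e.symm
    simp only [occIdx, hp, Bool.false_eq_true, if_false]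
    exact ih (pos + 1) h.2

theorem occIdx_ne_nil (xs : List Int) (pos : Int) (h : (1:Int) ∈ xs) :
    occIdx xs pos ≠ [] := by
  induction xs generalizing pos with
  | nil => simp at h
  | cons p rest ih =>
    rcases List.mem_cons.mp h with h1 | h1
    · simp [occIdx, h1.symm]
    · simp only [occIdx]
      by_cases hp : p == 1
      · simp [hp]
      · simpa [hp] using ih (pos + 1) h1

theorem altLoop_eq_gaps (xs : List Int) : ∀ j : Nat,
    altLoop xs xs.length (j : Int) = gapsOK (occIdx (xs.drop j) (j : Int)) := by
  intro j
  induction hn : xs.length - j using Nat.strong_induction_on generalizing j with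
  | _ m ih =>
  by_cases hlt : (j : Int) < (xs.length : Int)
  · have hjl : j < xs.length := by exact_mod_cast hlt
    -- xs.drop j = xs[j] :: xs.drop (j+1)
    have hdrop : xs.drop j = xs[j] :: xs.drop (j + 1) := by
      rw [List.drop_eq_getElem_cons hjl]
    have hget : PySem.List.pyGetD xs (j : Int) 0 = xs[j] := by
      simp [PySem.List.pyGetD_natCast, List.getD_eq_getElem?_getD, hjl]
    rw [altLoop, dif_pos hlt, hget]
    by_cases hx : xs[j] = 1
    · -- occupied seat: exclusion window = (xs.drop (j+1)).take 5
      have hslice : PySem.List.slice xs (some ((j:Int) + 1)) (some ((j:Int) + 6))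
          = (xs.drop (j + 1)).take 5 := by
        have e1 : (j : Int) + 1 = ((j + 1 : Nat) : Int) := by push_cast; ring
        have e2 : (j : Int) + 6 = ((j + 1 : Nat) : Int) + ((5 : Nat) : Int) := by push_cast; ring
        rw [e1, e2]
        exact PySem.List.slice_natCast_add (xs := xs) (j := j + 1) (n := 5)
      have hocc : occIdx (xs.drop j) (j : Int)
          = (j : Int) :: occIdx (xs.drop (j + 1)) ((j : Int) + 1) := by
        rw [hdrop]; simp [occIdx, hx]
      rw [if_neg (by simp [hx]), hslice, hocc]
      set r := xs.drop (j + 1) with hr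
      have hsplit : occIdx r ((j : Int) + 1)
          = occIdx (r.take 5) ((j : Int) + 1) ++ occIdx (r.drop 5) ((j : Int) + 1 + (r.take 5).length) := by
        conv_lhs => rw [← List.take_append_drop 5 r]
        exact occIdx_append _ _ _
      by_cases hw : (r.take 5).contains 1
      · -- a 1 within the next 5 cells: A's gap check fails on the first pair
        have hmem : (1 : Int) ∈ r.take 5 := by simpa using hw
        have hne := occIdx_ne_nil (r.take 5) ((j : Int) + 1) hmem
        rcases hh : occIdx (r.take 5) ((j : Int) + 1) with _ | ⟨h0, t0⟩
        · exact absurd hh hne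
        · have hb := mem_occIdx (r.take 5) ((j : Int) + 1) h0 (by rw [hh]; simp)
          have hlen5 : (r.take 5).length ≤ 5 := by simp
          rw [if_pos hw, hsplit, hh]
          simp only [List.cons_append]
          rw [gapsOK_cons2]
          have : ¬ (h0 - (j : Int) ≥ 6) := by
            rcases hb with ⟨_, hub⟩
            have : ((r.take 5).length : Int) ≤ 5 := by exact_mod_cast hlen5
            omega
          rw [decide_eq_false this, Bool.false_and]
      · -- window clear: jump to j + 6
        have hmem : (1 : Int) ∉ r.take 5 := by simpa using hw
        have hnil := occIdx_eq_nil (r.take 5) ((j : Int) + 1) hmem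
        rw [if_neg hw, hsplit, hnil, List.nil_append]
        have hjj : ((j + 6 : Nat) : Int) = (j : Int) + 6 := by push_cast; ring
        have ihm := ih (xs.length - (j + 6)) (by omega) (j + 6) rfl
        rw [hjj] at ihm
        rw [ihm]
        -- relate the two tails and discharge the leading element j of the gap list
        by_cases hlong : 5 ≤ r.length
        · have hlen : (r.take 5).length = 5 := by simp [hlong]
          have htail : r.drop 5 = xs.drop (j + 6) := by
            rw [hr, List.drop_drop]
          have hpos : (j : Int) + 1 + ((r.take 5).length : Int) = (j : Int) + 6 := by
            rw [hlen]; push_cast; ring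
          rw [hpos, htail]
          rcases hocc6 : occIdx (xs.drop (j + 6)) ((j : Int) + 6) with _ | ⟨h6, t6⟩
          · simp [gapsOK]
          · have hb6 := mem_occIdx (xs.drop (j + 6)) ((j : Int) + 6) h6 (by rw [hocc6]; simp)
            rw [gapsOK_cons2, decide_eq_true (by omega : h6 - (j : Int) ≥ 6), Bool.true_and]
        · -- short tail: everything past the window is empty on both sides
          have hrlen : r.length < 5 := by omega
          have htake : r.take 5 = r := List.take_of_length_le (by omega)
          have hx6 : xs.drop (j + 6) = [] := by
            apply List.drop_eq_nil_of_le
            have : r.length = xs.length - (j + 1) := by rw [hr]; simp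
            omega
          have hrd : r.drop 5 = [] := List.drop_eq_nil_of_le (by omega)
          rw [hrd, hx6]
          simp [occIdx, gapsOK]
    · -- empty seat: step by one
      have hocc : occIdx (xs.drop j) (j : Int)
          = occIdx (xs.drop (j + 1)) ((j : Int) + 1) := by
        rw [hdrop]; simp [occIdx, hx]
      have hjj : ((j + 1 : Nat) : Int) = (j : Int) + 1 := by push_cast; ring
      have ihm := ih (xs.length - (j + 1)) (by omega) (j + 1) rfl
      rw [hjj] at ihm
      rw [if_pos (by simp [hx]), ihm, hocc]
  · have hge : xs.length ≤ j := by omega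
    rw [altLoop, dif_neg hlt, List.drop_eq_nil_of_le hge]
    simp [occIdx, gapsOK]

-- ===== VERDICT =====
theorem check_rules_followed_spec : Claim_equal_check_rules_followed := by
  intro people_line _
  show check_rules_followed people_line = check_rules_followed_alt people_line
  unfold check_rules_followed check_rules_followed_alt
  rw [(loop_eq_gaps people_line 0 le_rfl).1]
  have := altLoop_eq_gaps people_line 0
  simpa using this.symm
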